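-- pv_equiv track=rewrite | github.com/jepeloa/shell_optimizacion | matrix_processor.py | generate_column_elements_balanced
-- ===== SOURCE A (Python) =====
-- def generate_column_elements_balanced(order):
--     """
--     Genera una columna balanceada con 1s y 2s según el pedido.
--     """
--     col_elements = []
--     while order >= 3:
--         col_elements.extend([1, 2])
--         order -= 3
--     if order == 2:
--         col_elements.append(2)
--     elif order == 1:
--         col_elements.append(1)
--     return col_elements
-- ===== SOURCE B (Python) =====
-- def generate_column_elements_balanced(order):
--     """
--     Genera una columna balanceada con 1s y 2s segun el pedido.
--     """
--     if order <= 0: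
--         return []
--     q, r = divmod(order, 3)
--     col_elements = [1, 2] * q
--     if r == 1:
--         col_elements.append(1)
--     elif r == 2:
--         col_elements.append(2)
--     return col_elements
-- ===== Notes on version B (the rewrite author's own statement) =====
-- stated objective: faster
-- what changed: Replaces the subtract-by-3 while loop with a single divmod and list replication ([1,2]*q plus the remainder element).
import Mathlib
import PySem

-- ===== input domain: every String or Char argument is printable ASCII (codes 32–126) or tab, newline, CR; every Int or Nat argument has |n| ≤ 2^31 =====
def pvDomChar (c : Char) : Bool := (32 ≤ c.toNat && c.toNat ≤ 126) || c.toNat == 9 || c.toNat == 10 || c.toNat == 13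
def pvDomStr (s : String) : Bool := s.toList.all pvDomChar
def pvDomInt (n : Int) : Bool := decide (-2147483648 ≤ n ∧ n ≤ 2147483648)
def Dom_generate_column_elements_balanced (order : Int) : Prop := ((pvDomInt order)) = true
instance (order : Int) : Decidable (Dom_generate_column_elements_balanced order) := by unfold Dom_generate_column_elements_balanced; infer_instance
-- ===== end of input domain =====

-- B replaces A's subtract-by-3 loop with one divmod and list replication (objective: faster, constant-factor/asymptotic loop removal).

-- ===== PORT A =====
-- the 'while order >= 3' loop of A, carrying col_elements as acc
def pvLoopA (order : Int) (acc : List Int) : List Int :=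
  if 3 ≤ order then pvLoopA (order - 3) (acc ++ [1, 2])
  else if order = 2 then acc ++ [2]
  else if order = 1 then acc ++ [1]
  else acc
termination_by order.toNat
decreasing_by omega

def generate_column_elements_balanced (order : Int) : List Int :=
  pvLoopA order []

-- ===== PORT B =====
def generate_column_elements_balanced_alt (order : Int) : List Int :=
  if order ≤ 0 then []
  else
    let q := PySem.Int.floordiv order 3
    let r := PySem.Int.mod order 3
    let col_elements := (List.replicate q.toNat [(1 : Int), 2]).flatten
    if r = 1 then col_elements ++ [1]
    else if r = 2 then col_elements ++ [2]
    else col_elements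

-- ===== PRECONDITION & SPEC =====
def Spec_generate_column_elements_balanced (order : Int) (out : List Int) : Prop := out = generate_column_elements_balanced_alt order
instance (order : Int) (out : List Int) : Decidable (Spec_generate_column_elements_balanced order out) := by unfold Spec_generate_column_elements_balanced; infer_instance

-- ===== CLAIM (what is proved, stated in full; the proofs are below) =====
def Claim_equal_generate_column_elements_balanced : Prop := ∀ (order : Int), Dom_generate_column_elements_balanced order → Spec_generate_column_elements_balanced order (generate_column_elements_balanced order)

-- ===== LEMMAS AND PROOFS =====

theorem pvAlt_step (order : Int) (h : 3 ≤ order) :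
    generate_column_elements_balanced_alt order =
      [1, 2] ++ generate_column_elements_balanced_alt (order - 3) := by
  unfold generate_column_elements_balanced_alt
  rw [PySem.Int.floordiv_eq_ediv_of_pos (by omega), PySem.Int.mod_eq_emod_of_pos (by omega),
      PySem.Int.floordiv_eq_ediv_of_pos (a := order - 3) (by omega),
      PySem.Int.mod_eq_emod_of_pos (a := order - 3) (by omega)]
  have hq : order / 3 = (order - 3) / 3 + 1 := by omega
  have hr : order % 3 = (order - 3) % 3 := by omega
  have hq0 : 0 ≤ (order - 3) / 3 := by omega
  have hqn : (order / 3).toNat = ((order - 3) / 3).toNat + 1 := by omega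
  by_cases h3 : order - 3 ≤ 0
  · have ho : order = 3 := by omega
    subst ho; decide
  · simp only [if_neg (by omega : ¬ order ≤ 0), if_neg h3, hr, hqn, List.replicate_succ,
      List.flatten_cons]
    split_ifs <;> simp

theorem pvLoopA_small (order : Int) (h : ¬ 3 ≤ order) (acc : List Int) :
    pvLoopA order acc = acc ++ generate_column_elements_balanced_alt order := by
  unfold pvLoopA
  rw [if_neg h]
  by_cases h2 : order = 2
  · subst h2; simp [generate_column_elements_balanced_alt]
  · by_cases h1 : order = 1
    · subst h1; simp [generate_column_elements_balanced_alt]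
    · have h0 : order ≤ 0 := by omega
      simp [h1, h2, generate_column_elements_balanced_alt, if_pos h0]

theorem pvLoopA_eq (n : Nat) : ∀ (order : Int), order.toNat ≤ n → ∀ (acc : List Int),
    pvLoopA order acc = acc ++ generate_column_elements_balanced_alt order := by
  induction n with
  | zero =>
    intro order h acc
    exact pvLoopA_small order (by omega) acc
  | succ m ih =>
    intro order h acc
    unfold pvLoopA
    by_cases h3 : 3 ≤ order
    · rw [if_pos h3, ih (order - 3) (by omega) (acc ++ [1, 2]), pvAlt_step order h3]
      simp
    · have := pvLoopA_small order h3 acc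
      unfold pvLoopA at this
      rw [if_neg h3] at this ⊢
      exact this

-- ===== VERDICT (by name: the statement is the Claim_ definition above) =====
theorem generate_column_elements_balanced_spec : Claim_equal_generate_column_elements_balanced := by
  intro order _
  unfold Spec_generate_column_elements_balanced generate_column_elements_balanced
  simpa using pvLoopA_eq order.toNat order le_rfl []
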